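-- pv_equiv track=rewrite | github.com/shukdevtroy/INNOVBOT-CHATBOT | app.py | create_context
-- ===== SOURCE A (Python) =====
-- def create_context(site_content, max_context_length=8000):
--     context = "Content from https://innovativeskillsbd.com website:\n\n"
--
--     for url, content in site_content.items():
--         # Add URL and a portion of its content (limited to keep context manageable)
--         page_content = f"Page: {url}\n{content[:1000]}...\n\n"
--
--         # Check if adding this would exceed max context length
--         if len(context) + len(page_content) > max_context_length:
--             break
--
--         context += page_content
--
--     return context
-- ===== SOURCE B (Python) =====
-- def _prefix_sums(start, lengths):
--     sums = []
--     total = start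
--     for n in lengths:
--         total += n
--         sums.append(total)
--     return sums
--
--
-- def create_context(site_content, max_context_length=8000):
--     header = "Content from https://innovativeskillsbd.com website:\n\n"
--     pages = [f"Page: {url}\n{content[:1000]}...\n\n" for url, content in site_content.items()]
--     cums = _prefix_sums(len(header), [len(p) for p in pages])
--     k = next((i for i, t in enumerate(cums) if t > max_context_length), len(pages))
--     return header + "".join(pages[:k])
-- ===== Notes on version B (the rewrite author's own statement) =====
-- stated objective: alternative
-- what changed: Replaced A's accumulate-string-and-break loop by a three-stage pipeline: format all page strings with a comprehension, prefix-sum their lengths from the header length, cut the list at the first overflowing cumulative sum, and join the kept prefix.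
import Mathlib
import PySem

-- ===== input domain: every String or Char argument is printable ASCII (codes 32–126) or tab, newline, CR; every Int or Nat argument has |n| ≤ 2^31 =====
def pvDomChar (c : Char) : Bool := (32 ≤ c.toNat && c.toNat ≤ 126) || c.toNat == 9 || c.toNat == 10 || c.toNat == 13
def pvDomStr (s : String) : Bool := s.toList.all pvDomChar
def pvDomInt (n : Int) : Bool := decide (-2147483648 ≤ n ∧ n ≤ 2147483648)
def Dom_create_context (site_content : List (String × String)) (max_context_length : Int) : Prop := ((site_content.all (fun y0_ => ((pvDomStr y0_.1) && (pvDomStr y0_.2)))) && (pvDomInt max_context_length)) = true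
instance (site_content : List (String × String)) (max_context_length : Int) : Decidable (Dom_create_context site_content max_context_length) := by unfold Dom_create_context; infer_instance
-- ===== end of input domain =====

-- B replaces A's accumulate-and-break loop by "format all pages, prefix-sum their lengths,
-- cut at the first overflow, join" (objective: alternative decomposition, same cost).
-- Both ports work over List Char (PySem's Chars view of str), exact on the domain.

-- ===== PORT A =====
-- the f-string "Page: {url}\n{content[:1000]}...\n\n" (shared formatter helper)
def ccPage (url content : List Char) : List Char :=
  "Page: ".toList ++ url ++ '\n' :: PySem.List.slice content (some 0) (some 1000) ++ "...\n\n".toList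

-- the for-loop with break: stops as soon as adding the page would overflow
def ccGoA (max_context_length : Int) : List (String × String) → List Char → List Char
  | [], ctx => ctx
  | (url, content) :: rest, ctx =>
    let page := ccPage url.toList content.toList
    if (ctx.length : Int) + (page.length : Int) > max_context_length then ctx
    else ccGoA max_context_length rest (ctx ++ page)

def create_context (site_content : List (String × String)) (max_context_length : Int) : String :=
  String.ofList (ccGoA max_context_length site_content
    "Content from https://innovativeskillsbd.com website:\n\n".toList)

-- ===== PORT B =====
-- _prefix_sums(start, lengths): running totals, one per element
def ccPrefixSums (start : Int) : List Int → List Int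
  | [] => []
  | n :: rest => (start + n) :: ccPrefixSums (start + n) rest

def create_context_alt (site_content : List (String × String)) (max_context_length : Int) : String :=
  let header := "Content from https://innovativeskillsbd.com website:\n\n".toList
  let pages := site_content.map (fun p => ccPage p.1.toList p.2.toList)
  let cums := ccPrefixSums (header.length : Int) (pages.map (fun p => (p.length : Int)))
  -- k = next((i for i, t in enumerate(cums) if t > max_context_length), len(pages))
  let k := (cums.findIdx? (fun t => decide (t > max_context_length))).getD pages.length
  -- header + "".join(pages[:k])  ("".join on code points is flatten, exact)
  String.ofList (header ++ (pages.take k).flatten)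

-- ===== PRECONDITION & SPEC =====
def Spec_create_context (site_content : List (String × String)) (max_context_length : Int) (out : String) : Prop := out = create_context_alt site_content max_context_length
instance (site_content : List (String × String)) (max_context_length : Int) (out : String) : Decidable (Spec_create_context site_content max_context_length out) := by unfold Spec_create_context; infer_instance

-- ===== CLAIM (what is proved, stated in full; the proofs are below) =====
def Claim_equal_create_context : Prop := ∀ (site_content : List (String × String)) (max_context_length : Int), Dom_create_context site_content max_context_length → Spec_create_context site_content max_context_length (create_context site_content max_context_length)

-- ===== LEMMAS AND PROOFS =====

-- the break-loop equals "take up to the first prefix-sum overflow", for any accumulated context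
lemma ccGoA_eq (m : Int) (l : List (String × String)) : ∀ (ctx : List Char),
    ccGoA m l ctx =
      ctx ++ ((l.map (fun p => ccPage p.1.toList p.2.toList)).take
        (((ccPrefixSums (ctx.length : Int)
            ((l.map (fun p => ccPage p.1.toList p.2.toList)).map (fun p => (p.length : Int)))).findIdx?
          (fun t => decide (t > m))).getD l.length)).flatten := by
  induction l with
  | nil => intro ctx; simp [ccGoA, ccPrefixSums]
  | cons hd tl ih =>
    intro ctx
    obtain ⟨url, content⟩ := hd
    simp only [ccGoA, List.map_cons, List.map_cons, ccPrefixSums, List.findIdx?_cons]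
    by_cases h : (ctx.length : Int) + ((ccPage url.toList content.toList).length : Int) > m
    · simp [h]
    · rw [if_neg h, ih (ctx ++ ccPage url.toList content.toList)]
      have hlen : (((ctx ++ ccPage url.toList content.toList).length : Nat) : Int)
          = (ctx.length : Int) + ((ccPage url.toList content.toList).length : Int) := by
        simp
      rw [hlen]
      simp only [decide_eq_true_eq, if_neg h]
      cases hfi : ((ccPrefixSums ((ctx.length : Int) + ((ccPage url.toList content.toList).length : Int))
            ((tl.map (fun p => ccPage p.1.toList p.2.toList)).map (fun p => (p.length : Int)))).findIdx?
          (fun t => decide (t > m))) with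
      | none => simp [List.take_of_length_le]
      | some i => simp [List.take_succ_cons]

-- ===== VERDICT (by name: the statement is the Claim_ definition above) =====
theorem create_context_spec : Claim_equal_create_context := by
  intro sc m _
  unfold Spec_create_context create_context create_context_alt
  rw [ccGoA_eq]
  simp
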